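-- pv_equiv track=rewrite | github.com/LHansoon/bill-calculator | lambda_src/lambda_function.py | simple_process
-- ===== SOURCE A (Python) =====
-- def simple_process(arrangement):
--     new_arrangement = arrangement.copy()
--     finished_user = []
--     for user in list(new_arrangement.keys()):
--         user_bill = new_arrangement[user]
--         for sub_user in user_bill.keys():
--             if sub_user not in finished_user and new_arrangement.get(sub_user) is not None:
--                 user_need_to_pay = new_arrangement[user][sub_user]
--                 sub_user_need_to_pay = new_arrangement[sub_user][user] if new_arrangement[sub_user].get(
--                     user) is not None else -1
--                 if sub_user_need_to_pay != -1:
--                     if sub_user in list(user_bill.keys()):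
--                         if user_need_to_pay <= sub_user_need_to_pay:
--                             new_arrangement[user][sub_user] = 0
--                             new_arrangement[sub_user][user] = sub_user_need_to_pay - user_need_to_pay
--                         else:
--                             new_arrangement[sub_user][user] = 0
--                             new_arrangement[user][sub_user] = user_need_to_pay - sub_user_need_to_pay
--         finished_user.append(user)
--     return new_arrangement
-- ===== SOURCE B (Python) =====
-- def simple_process(arrangement):
--     def netted(user, other, debt):
--         if other in arrangement and user in arrangement[other]:
--             return max(debt - arrangement[other][user], 0)
--         return debt
--
--     return {user: {other: netted(user, other, debt) for other, debt in bill.items()}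
--             for user, bill in arrangement.items()}
-- ===== Notes on version B (the rewrite author's own statement) =====
-- stated objective: simpler
-- what changed: Replaces A's stateful double loop (finished_user list, sequential in-place netting on a shallow copy, an O(m) 'in list(keys)' rescan per entry) by a pure per-entry rebuild: each output debt is max(debt - counter_debt, 0) whenever the counter entry exists, computed directly from the input dict with no mutation and no bookkeeping list; Pre_ excludes association lists with duplicate outer or inner keys, which do not represent any Python dict.
-- intended difference: On inputs containing a mutual debt pair whose stored counter-debt (the later key's debt to the earlier, or a self-debt) equals -1, A skips netting that pair because its code reuses -1 both as a stored value and as its missing-entry sentinel and returns the pair unnetted, while B nets it like any other pair, which is the intended behaviour for a stored value of -1. — e.g. on simple_process([("a", [("b", 5)]), ("b", [("a", -1)])]): A returns [("a", [("b", 5)]), ("b", [("a", -1)])], B returns [("a", [("b", 6)]), ("b", [("a", 0)])]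
import Mathlib
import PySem

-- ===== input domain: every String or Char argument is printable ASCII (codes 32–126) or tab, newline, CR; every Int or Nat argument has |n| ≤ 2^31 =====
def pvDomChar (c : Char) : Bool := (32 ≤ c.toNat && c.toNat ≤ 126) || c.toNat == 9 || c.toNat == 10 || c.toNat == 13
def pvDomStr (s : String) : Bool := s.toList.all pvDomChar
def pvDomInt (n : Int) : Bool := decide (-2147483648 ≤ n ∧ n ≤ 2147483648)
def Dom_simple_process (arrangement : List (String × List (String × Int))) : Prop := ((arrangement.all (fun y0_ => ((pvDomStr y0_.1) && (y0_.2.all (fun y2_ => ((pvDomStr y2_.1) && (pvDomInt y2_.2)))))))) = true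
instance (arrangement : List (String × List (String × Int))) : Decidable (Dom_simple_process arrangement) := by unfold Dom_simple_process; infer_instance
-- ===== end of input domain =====

-- B rebuilds the result per entry with the closed formula max(debt - counter_debt, 0) instead of
-- A's stateful double loop with a finished_user list; equivalence is about the RETURN value only
-- (Python A mutates the caller's inner dicts through its shallow copy, B does not).

-- ===== PORT A =====
-- A's `new_arrangement` is a dict of dicts; `user_bill` aliases new_arrangement[user], whose
-- key set never changes during the loop (both writes overwrite existing keys), so iterating a
-- snapshot of its keys, and re-reading rows from the current dict, is exact.
def simple_process (arrangement : List (String × List (String × Int))) : List (String × List (String × Int)) :=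
  let d0 : PySem.Dict String (PySem.Dict String Int) :=
    PySem.Dict.mk (arrangement.map (fun p => (p.1, PySem.Dict.mk p.2)))
  let final :=
    d0.keys.foldl (fun (st : PySem.Dict String (PySem.Dict String Int) × List String) user =>
      let d := st.1
      let finished := st.2
      let user_bill := d.getD user PySem.Dict.empty   -- new_arrangement[user] (key always present)
      let d' := user_bill.keys.foldl (fun d sub_user =>
        if !(finished.contains sub_user) && (d.get? sub_user).isSome then
          let user_need := (d.getD user PySem.Dict.empty).getD sub_user 0
          let sub_need := ((d.getD sub_user PySem.Dict.empty).get? user).getD (-1)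
          if sub_need ≠ -1 then
            if (d.getD user PySem.Dict.empty).keys.contains sub_user then
              if user_need ≤ sub_need then
                let d1 := d.insert user ((d.getD user PySem.Dict.empty).insert sub_user 0)
                d1.insert sub_user ((d1.getD sub_user PySem.Dict.empty).insert user (sub_need - user_need))
              else
                let d1 := d.insert sub_user ((d.getD sub_user PySem.Dict.empty).insert user 0)
                d1.insert user ((d1.getD user PySem.Dict.empty).insert sub_user (user_need - sub_need))
            else d
          else d
        else d) d
      (d', finished ++ [user])) (d0, [])
  final.1.items.map (fun p => (p.1, p.2.items))

-- ===== PORT B =====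
-- helper for B: Source B's `netted(user, other, debt)`
def pvNetted (arrangement : List (String × List (String × Int))) (user other : String) (debt : Int) : Int :=
  if (PySem.Dict.mk arrangement).contains other
      && (PySem.Dict.mk ((PySem.Dict.mk arrangement).getD other [])).contains user then
    max (debt - (PySem.Dict.mk ((PySem.Dict.mk arrangement).getD other [])).getD user 0) 0
  else debt

def simple_process_alt (arrangement : List (String × List (String × Int))) : List (String × List (String × Int)) :=
  arrangement.map (fun p => (p.1, p.2.map (fun q => (q.1, pvNetted arrangement p.1 q.1 q.2))))

-- ===== PRECONDITION & SPEC =====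
-- Pre_ restricts to valid dict representations: association lists with duplicate outer or inner
-- keys do not represent any Python dict (A's argument is a dict, which cannot hold them).
def Pre_simple_process (arrangement : List (String × List (String × Int))) : Prop :=
  (arrangement.map (·.1)).Nodup ∧ ∀ p ∈ arrangement, (p.2.map (·.1)).Nodup

instance (arrangement : List (String × List (String × Int))) : Decidable (Pre_simple_process arrangement) := by
  unfold Pre_simple_process; infer_instance

def pvWitness_simple_process : (List (String × List (String × Int))) :=
  [("a", [("b", 5), ("c", 2)]), ("b", [("a", 3)]), ("c", [("c", 4)])]

-- On inputs containing a mutual debt pair whose stored counter-debt (the later key's debt to the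
-- earlier, or a self-debt) equals -1, A skips netting that pair because it reuses -1 both as a
-- stored value and as its missing-entry sentinel and returns the pair unnetted, while B nets it
-- like any other pair, which is the intended behaviour for a stored value of -1.
def D_simple_process (arrangement : List (String × List (String × Int))) : Prop :=
  ∃ p ∈ arrangement, ∃ q ∈ arrangement, ([p, q].Sublist arrangement ∨ p = q) ∧
    (PySem.Dict.mk p.2).get? q.1 ≠ none ∧
    (PySem.Dict.mk q.2).get? p.1 = some (-1)

instance (arrangement : List (String × List (String × Int))) : Decidable (D_simple_process arrangement) := by
  unfold D_simple_process; infer_instance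

def Spec_simple_process (arrangement : List (String × List (String × Int))) (out : List (String × List (String × Int))) : Prop := ¬ D_simple_process arrangement → out = simple_process_alt arrangement
instance (arrangement : List (String × List (String × Int))) (out : List (String × List (String × Int))) : Decidable (Spec_simple_process arrangement out) := by unfold Spec_simple_process; infer_instance

def pvDiffWitness_simple_process : (List (String × List (String × Int))) :=
  [("a", [("b", 5)]), ("b", [("a", -1)])]

def pvDiffWitnessOut_simple_process : (List (String × List (String × Int))) × (List (String × List (String × Int))) :=
  ([("a", [("b", 5)]), ("b", [("a", -1)])], [("a", [("b", 6)]), ("b", [("a", 0)])])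

-- ===== CLAIM (what is proved, stated in full; the proofs are below) =====
def Claim_unchanged_simple_process : Prop := ∀ (arrangement : List (String × List (String × Int))), Dom_simple_process arrangement → Pre_simple_process arrangement → Spec_simple_process arrangement (simple_process arrangement)

def Claim_changed_simple_process : Prop := Dom_simple_process (pvDiffWitness_simple_process) ∧ Pre_simple_process (pvDiffWitness_simple_process) ∧ D_simple_process (pvDiffWitness_simple_process) ∧ simple_process (pvDiffWitness_simple_process) = pvDiffWitnessOut_simple_process.1 ∧ simple_process_alt (pvDiffWitness_simple_process) = pvDiffWitnessOut_simple_process.2 ∧ pvDiffWitnessOut_simple_process.1 ≠ pvDiffWitnessOut_simple_process.2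

def Claim_exact_simple_process : Prop := ∀ (arrangement : List (String × List (String × Int))), Dom_simple_process arrangement → Pre_simple_process arrangement → D_simple_process arrangement → simple_process arrangement ≠ simple_process_alt arrangement

-- ===== LEMMAS AND PROOFS =====

-- proof-side abbreviations
def pvKeys (a : List (String × List (String × Int))) : List String := a.map (·.1)

-- closed characterization of A's per-entry result (what the loop leaves at row u, column s),
-- including A's -1 sentinel; proof-side only
def pvChar (a : List (String × List (String × Int))) (keys : List String)
    (u s : String) (v : Int) : Int :=
  if keys.contains s then
    let fs := if (PySem.List.index? keys u).getD 0 ≤ (PySem.List.index? keys s).getD 0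
              then (u, s) else (s, u)
    let first_bill := (PySem.Dict.mk a).getD fs.1 []
    let second_bill := (PySem.Dict.mk a).getD fs.2 []
    if (PySem.Dict.mk first_bill).contains fs.2 && (PySem.Dict.mk second_bill).contains fs.1
        && !((PySem.Dict.mk second_bill).getD fs.1 0 == -1) then
      let x := (PySem.Dict.mk first_bill).getD fs.2 0
      let y := (PySem.Dict.mk second_bill).getD fs.1 0
      if x ≤ y then (if (u, s) = fs then 0 else y - x)
      else (if (u, s) = fs then x - y else 0)
    else v
  else v

def pvF (a : List (String × List (String × Int))) (u s : String) (v : Int) : Int :=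
  pvChar a (pvKeys a) u s v

def pvVal (a : List (String × List (String × Int))) (c : String → String → Bool)
    (u s : String) (v : Int) : Int :=
  if c u s then pvF a u s v else v

def pvShape {β γ : Type} (l : List (String × β)) (g : String → β → γ) :
    PySem.Dict String γ :=
  PySem.Dict.mk (l.map (fun r => (r.1, g r.1 r.2)))

def pvRowG (a : List (String × List (String × Int))) (c : String → String → Bool)
    (u : String) (bill : List (String × Int)) : PySem.Dict String Int :=
  pvShape bill (fun s v => pvVal a c u s v)

def pvD (a : List (String × List (String × Int))) (c : String → String → Bool) :
    PySem.Dict String (PySem.Dict String Int) :=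
  pvShape a (pvRowG a c)

-- which entries have already been netted, during the outer / inner loop
def pvCOut (P : List String) : String → String → Bool :=
  fun x y => decide (x ∈ P) || decide (y ∈ P)

def pvCIn (P : List String) (u : String) (S : List String) : String → String → Bool :=
  fun x y => decide (x ∈ P) || decide (y ∈ P) || (x == u && decide (y ∈ S)) || (y == u && decide (x ∈ S))

-- the two loop bodies of port A, named for the inductions (definitionally the port's lambdas)
def pvStepIn (user : String) (finished : List String)
    (d : PySem.Dict String (PySem.Dict String Int)) (sub_user : String) :
    PySem.Dict String (PySem.Dict String Int) :=
  if !(finished.contains sub_user) && (d.get? sub_user).isSome then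
    let user_need := (d.getD user PySem.Dict.empty).getD sub_user 0
    let sub_need := ((d.getD sub_user PySem.Dict.empty).get? user).getD (-1)
    if sub_need ≠ -1 then
      if (d.getD user PySem.Dict.empty).keys.contains sub_user then
        if user_need ≤ sub_need then
          let d1 := d.insert user ((d.getD user PySem.Dict.empty).insert sub_user 0)
          d1.insert sub_user ((d1.getD sub_user PySem.Dict.empty).insert user (sub_need - user_need))
        else
          let d1 := d.insert sub_user ((d.getD sub_user PySem.Dict.empty).insert user 0)
          d1.insert user ((d1.getD user PySem.Dict.empty).insert sub_user (user_need - sub_need))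
      else d
    else d
  else d

def pvStepOut (st : PySem.Dict String (PySem.Dict String Int) × List String) (user : String) :
    PySem.Dict String (PySem.Dict String Int) × List String :=
  let d := st.1
  let finished := st.2
  let user_bill := d.getD user PySem.Dict.empty
  let d' := user_bill.keys.foldl (pvStepIn user finished) d
  (d', finished ++ [user])

lemma simple_process_def (a : List (String × List (String × Int))) :
    simple_process a =
      (((PySem.Dict.mk (a.map (fun p => (p.1, PySem.Dict.mk p.2)))).keys).foldl pvStepOut
          (PySem.Dict.mk (a.map (fun p => (p.1, PySem.Dict.mk p.2))), [])).1.items.map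
        (fun p => (p.1, p.2.items)) := rfl

-- small Bool/Prop glue
lemma bool_eq_of_iff {a b : Bool} (h : a = true ↔ b = true) : a = b := by
  cases a <;> cases b <;> simp_all

lemma bool_false_of_not {b : Bool} (h : ¬ b = true) : b = false := by
  cases b
  · rfl
  · exact absurd rfl h

lemma not_true_of_false {b : Bool} (h : b = false) : ¬ b = true := by
  rw [h]
  exact Bool.false_ne_true

lemma pvCOut_iff (P : List String) (x y : String) :
    pvCOut P x y = true ↔ (x ∈ P ∨ y ∈ P) := by
  simp [pvCOut]

lemma pvCIn_iff (P : List String) (u : String) (S : List String) (x y : String) :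
    pvCIn P u S x y = true ↔ (x ∈ P ∨ y ∈ P ∨ (x = u ∧ y ∈ S) ∨ (y = u ∧ x ∈ S)) := by
  simp [pvCIn, or_assoc]

-- generic association-list lemmas
lemma items_mk {β : Type} (l : List (String × β)) : (PySem.Dict.mk l).items = l := rfl

lemma get?_mk_eq_find? {β : Type} (l : List (String × β)) (k : String) :
    (PySem.Dict.mk l).get? k = (l.find? (fun r => r.1 == k)).map (·.2) := by
  induction l with
  | nil => rfl
  | cons r rest ih =>
    obtain ⟨x, v⟩ := r
    rw [PySem.Dict.get?_mk_cons]
    by_cases hxk : (x == k) = true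
    · rw [if_pos hxk, List.find?_cons_of_pos (p := fun r : String × β => r.1 == k) (a := (x, v)) (by simpa using hxk)]
      rfl
    · rw [if_neg hxk, List.find?_cons_of_neg (p := fun r : String × β => r.1 == k) (a := (x, v)) (by simpa using hxk), ih]

lemma pvShape_get? {β γ : Type} (l : List (String × β)) (g : String → β → γ) (k : String) :
    (pvShape l g).get? k = (l.find? (fun r => r.1 == k)).map (fun r => g r.1 r.2) := by
  rw [pvShape, get?_mk_eq_find?, List.find?_map]
  simp [Function.comp_def, Option.map_map]

lemma find?_key_nodup {β : Type} {l : List (String × β)} {r : String × β}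
    (hnd : (l.map (·.1)).Nodup) (hr : r ∈ l) :
    l.find? (fun r' => r'.1 == r.1) = some r := by
  induction l with
  | nil => simp at hr
  | cons r0 rest ih =>
    simp only [List.map_cons, List.nodup_cons] at hnd
    rcases List.mem_cons.mp hr with rfl | hr'
    · exact List.find?_cons_of_pos (p := fun r' : String × β => r'.1 == r.1) (a := r) (by simp)
    · have hne : ¬ ((r0.1 == r.1) = true) := by
        simp only [beq_iff_eq]
        intro h
        exact hnd.1 (by rw [h]; exact List.mem_map.mpr ⟨r, hr', rfl⟩)
      rw [List.find?_cons_of_neg (p := fun r' : String × β => r'.1 == r.1) (a := r0) (by simpa using hne), ih hnd.2 hr']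

lemma key_inj {β : Type} {l : List (String × β)} {r r' : String × β}
    (hnd : (l.map (·.1)).Nodup) (hr : r ∈ l) (hr' : r' ∈ l) (h : r'.1 = r.1) : r' = r := by
  induction l with
  | nil => simp at hr
  | cons r0 rest ih =>
    simp only [List.map_cons, List.nodup_cons] at hnd
    rcases List.mem_cons.mp hr with rfl | hr1 <;> rcases List.mem_cons.mp hr' with rfl | hr2
    · rfl
    · exact absurd (List.mem_map.mpr ⟨r', hr2, h⟩) hnd.1
    · exact absurd (List.mem_map.mpr ⟨r, hr1, h.symm⟩) hnd.1
    · exact ih hnd.2 hr1 hr2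

lemma getD_mk_of_mem {β : Type} {l : List (String × β)} {q : String × β}
    (hnd : (l.map (·.1)).Nodup) (hq : q ∈ l) (d0 : β) :
    (PySem.Dict.mk l).getD q.1 d0 = q.2 := by
  rw [PySem.Dict.getD_eq_get?_getD, get?_mk_eq_find?, find?_key_nodup hnd hq]
  rfl

lemma contains_mk_eq {β : Type} (l : List (String × β)) (k : String) :
    (PySem.Dict.mk l).contains k = decide (k ∈ l.map (·.1)) := by
  rw [PySem.Dict.contains_eq_decide_mem_keys, PySem.Dict.keys_mk]

lemma pvShape_keys {β γ : Type} (l : List (String × β)) (g : String → β → γ) :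
    (pvShape l g).keys = l.map (·.1) := by
  rw [pvShape, PySem.Dict.keys_mk, List.map_map]
  rfl

lemma pvShape_congr {β γ : Type} (l : List (String × β)) (g g' : String → β → γ)
    (h : ∀ r ∈ l, g r.1 r.2 = g' r.1 r.2) : pvShape l g = pvShape l g' := by
  unfold pvShape
  congr 1
  exact List.map_congr_left (fun r hr => by rw [h r hr])

lemma pvShape_insert {β γ : Type} (l : List (String × β)) (g g' : String → β → γ)
    (hnd : (l.map (·.1)).Nodup) (r : String × β) (hr : r ∈ l) (w : γ)
    (hw : w = g' r.1 r.2)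
    (hagree : ∀ r' ∈ l, r'.1 ≠ r.1 → g' r'.1 r'.2 = g r'.1 r'.2) :
    (pvShape l g).insert r.1 w = pvShape l g' := by
  have hcont : (pvShape l g).contains r.1 = true := by
    rw [pvShape, contains_mk_eq]
    simp only [List.map_map, decide_eq_true_eq]
    exact List.mem_map.mpr ⟨r, hr, rfl⟩
  apply PySem.Dict.ext
  rw [PySem.Dict.items_insert_of_contains _ _ hcont]
  show ((l.map _).map _) = _
  rw [pvShape, items_mk, List.map_map]
  apply List.map_congr_left
  intro r' hr'
  by_cases hk : r'.1 = r.1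
  · have hrr : r' = r := key_inj hnd hr hr' hk
    subst hrr
    simp only [Function.comp_apply]
    rw [if_pos (by simp), hw]
  · simp only [Function.comp_apply]
    rw [if_neg (by simp [hk]), hagree r' hr' hk]

-- read lemmas for the shaped dictionaries
lemma pvD_keys (a : List (String × List (String × Int))) (c : String → String → Bool) :
    (pvD a c).keys = pvKeys a := pvShape_keys a (pvRowG a c)

lemma pvD_get?_of_mem {a : List (String × List (String × Int))} (c : String → String → Bool)
    {p : String × List (String × Int)} (hnd : (pvKeys a).Nodup) (hp : p ∈ a) :
    (pvD a c).get? p.1 = some (pvRowG a c p.1 p.2) := by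
  rw [pvD, pvShape_get?, find?_key_nodup hnd hp]
  rfl

lemma pvD_getD_of_mem {a : List (String × List (String × Int))} (c : String → String → Bool)
    {p : String × List (String × Int)} (hnd : (pvKeys a).Nodup) (hp : p ∈ a) :
    (pvD a c).getD p.1 PySem.Dict.empty = pvRowG a c p.1 p.2 := by
  rw [PySem.Dict.getD_eq_get?_getD, pvD_get?_of_mem c hnd hp]
  rfl

lemma pvD_get?_of_not_mem (a : List (String × List (String × Int))) (c : String → String → Bool)
    {k : String} (hk : k ∉ pvKeys a) : (pvD a c).get? k = none := by
  rw [pvD, pvShape_get?]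
  have hfind : a.find? (fun r => r.1 == k) = none := by
    rw [List.find?_eq_none]
    intro r hr
    simp only [beq_iff_eq]
    intro h
    exact hk (by rw [← h]; exact List.mem_map.mpr ⟨r, hr, rfl⟩)
  rw [hfind]
  rfl

lemma pvRowG_keys (a : List (String × List (String × Int))) (c : String → String → Bool)
    (u : String) (bill : List (String × Int)) :
    (pvRowG a c u bill).keys = bill.map (·.1) := pvShape_keys bill _

lemma pvRowG_get?_of_mem (a : List (String × List (String × Int))) (c : String → String → Bool)
    (u : String) {bill : List (String × Int)} {q : String × Int}
    (hnd : (bill.map (·.1)).Nodup) (hq : q ∈ bill) :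
    (pvRowG a c u bill).get? q.1 = some (pvVal a c u q.1 q.2) := by
  rw [pvRowG, pvShape_get?, find?_key_nodup hnd hq]
  rfl

lemma pvRowG_get?_of_not_mem (a : List (String × List (String × Int))) (c : String → String → Bool)
    (u : String) {bill : List (String × Int)} {k : String}
    (hk : k ∉ bill.map (·.1)) : (pvRowG a c u bill).get? k = none := by
  rw [pvRowG, pvShape_get?]
  have hfind : bill.find? (fun r => r.1 == k) = none := by
    rw [List.find?_eq_none]
    intro r hr
    simp only [beq_iff_eq]
    intro h
    exact hk (by rw [← h]; exact List.mem_map.mpr ⟨r, hr, rfl⟩)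
  rw [hfind]
  rfl

lemma pvRowG_getD_of_mem (a : List (String × List (String × Int))) (c : String → String → Bool)
    (u : String) {bill : List (String × Int)} {q : String × Int}
    (hnd : (bill.map (·.1)).Nodup) (hq : q ∈ bill) :
    (pvRowG a c u bill).getD q.1 0 = pvVal a c u q.1 q.2 := by
  rw [PySem.Dict.getD_eq_get?_getD, pvRowG_get?_of_mem a c u hnd hq]
  rfl

lemma pvShape_getD_of_mem {β γ : Type} {l : List (String × β)} (g : String → β → γ)
    {r : String × β} (hnd : (l.map (·.1)).Nodup) (hr : r ∈ l) (d0 : γ) :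
    (pvShape l g).getD r.1 d0 = g r.1 r.2 := by
  rw [PySem.Dict.getD_eq_get?_getD, pvShape_get?, find?_key_nodup hnd hr]
  rfl

-- the one congruence principle all skip-cases use
lemma pvVal_eq_of {a : List (String × List (String × Int))} {c c' : String → String → Bool}
    {u s : String} {v : Int}
    (h : c u s = c' u s ∨ pvF a u s v = v) : pvVal a c u s v = pvVal a c' u s v := by
  rcases h with h | h
  · unfold pvVal
    rw [h]
  · simp [pvVal, h]

lemma pvD_congr_entries {a : List (String × List (String × Int))} {c c' : String → String → Bool}
    (h : ∀ p ∈ a, ∀ q ∈ p.2, pvVal a c p.1 q.1 q.2 = pvVal a c' p.1 q.1 q.2) :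
    pvD a c = pvD a c' := by
  apply pvShape_congr
  intro p hp
  apply pvShape_congr
  intro q hq
  exact h p hp q hq

-- positions in the key list
lemma pv_not_mem_left {P R : List String} {u : String} (hnd : (P ++ u :: R).Nodup) : u ∉ P := by
  intro hu
  rw [List.nodup_append] at hnd
  exact hnd.2.2 u hu u (by simp) rfl

lemma pv_index_self {P R : List String} {u : String} (hnd : (P ++ u :: R).Nodup) :
    PySem.List.index? (P ++ u :: R) u = some P.length :=
  (PySem.List.index?_eq_some_iff _ _ _).mpr ⟨P, R, rfl, rfl, pv_not_mem_left hnd⟩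

lemma pv_index_later {P R : List String} {u s : String}
    (hs : s ∈ P ++ u :: R) (hsP : s ∉ P) (hsu : s ≠ u) :
    ∃ k, PySem.List.index? (P ++ u :: R) s = some k ∧ P.length < k := by
  obtain ⟨k, hk⟩ := Option.isSome_iff_exists.mp ((PySem.List.index?_isSome_iff _ _).mpr hs)
  refine ⟨k, hk, ?_⟩
  obtain ⟨hklt, hkeq, -⟩ := PySem.List.getElem_of_index?_eq_some hk
  by_contra hnlt
  have hle : k ≤ P.length := Nat.le_of_not_lt hnlt
  rcases Nat.lt_or_ge k P.length with hlt | hge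
  · apply hsP
    have hP : (P ++ u :: R)[k]'hklt = P[k]'hlt := List.getElem_append_left hlt
    rw [hP] at hkeq
    rw [← hkeq]
    exact List.getElem_mem hlt
  · have hkP : k = P.length := Nat.le_antisymm hle hge
    subst hkP
    apply hsu
    have hP : (P ++ u :: R)[P.length]'hklt = (u :: R)[P.length - P.length]'(by simp) :=
      List.getElem_append_right (Nat.le_refl _)
    rw [hP] at hkeq
    simpa using hkeq.symm

lemma pv_cmp_le {P R : List String} {u s : String} (hnd : (P ++ u :: R).Nodup)
    (hs : s ∈ P ++ u :: R) (hsP : s ∉ P) :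
    (PySem.List.index? (P ++ u :: R) u).getD 0 ≤ (PySem.List.index? (P ++ u :: R) s).getD 0 := by
  by_cases hsu : s = u
  · subst hsu
    exact Nat.le_refl _
  · obtain ⟨k, hk, hlt⟩ := pv_index_later hs hsP hsu
    rw [pv_index_self hnd, hk]
    exact Nat.le_of_lt hlt

lemma pv_cmp_not_le {P R : List String} {u s : String} (hnd : (P ++ u :: R).Nodup)
    (hs : s ∈ P ++ u :: R) (hsP : s ∉ P) (hsu : s ≠ u) :
    ¬ ((PySem.List.index? (P ++ u :: R) s).getD 0 ≤ (PySem.List.index? (P ++ u :: R) u).getD 0) := by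
  obtain ⟨k, hk, hlt⟩ := pv_index_later hs hsP hsu
  rw [pv_index_self hnd, hk]
  simpa using hlt

-- evaluation of A's characterization formula in the configurations the loop meets
lemma pvF_shape {a : List (String × List (String × Int))}
    (hnd : (pvKeys a).Nodup)
    {P R : List String} {pu ps : String × List (String × Int)} (hpu : pu ∈ a) (hps : ps ∈ a)
    (hkeys : pvKeys a = P ++ pu.1 :: R) (hsP : ps.1 ∉ P) (v : Int) :
    (pvF a pu.1 ps.1 v =
      if (ps.1 ∈ pu.2.map (·.1) ∧ pu.1 ∈ ps.2.map (·.1) ∧ (PySem.Dict.mk ps.2).getD pu.1 0 ≠ -1) then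
        (if (PySem.Dict.mk pu.2).getD ps.1 0 ≤ (PySem.Dict.mk ps.2).getD pu.1 0
         then 0
         else (PySem.Dict.mk pu.2).getD ps.1 0 - (PySem.Dict.mk ps.2).getD pu.1 0)
      else v)
    ∧ (ps.1 ≠ pu.1 → pvF a ps.1 pu.1 v =
      if (ps.1 ∈ pu.2.map (·.1) ∧ pu.1 ∈ ps.2.map (·.1) ∧ (PySem.Dict.mk ps.2).getD pu.1 0 ≠ -1) then
        (if (PySem.Dict.mk pu.2).getD ps.1 0 ≤ (PySem.Dict.mk ps.2).getD pu.1 0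
         then (PySem.Dict.mk ps.2).getD pu.1 0 - (PySem.Dict.mk pu.2).getD ps.1 0
         else 0)
      else v) := by
  have hnd' : (P ++ pu.1 :: R).Nodup := by rw [← hkeys]; exact hnd
  have hu_mem : pu.1 ∈ pvKeys a := List.mem_map.mpr ⟨pu, hpu, rfl⟩
  have hs_mem : ps.1 ∈ pvKeys a := List.mem_map.mpr ⟨ps, hps, rfl⟩
  have hs_mem' : ps.1 ∈ P ++ pu.1 :: R := by rw [← hkeys]; exact hs_mem
  have hcu : ((pvKeys a).contains pu.1) = true := by simpa using hu_mem
  have hcs : ((pvKeys a).contains ps.1) = true := by simpa using hs_mem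
  have hle : (PySem.List.index? (pvKeys a) pu.1).getD 0 ≤ (PySem.List.index? (pvKeys a) ps.1).getD 0 := by
    rw [hkeys]
    exact pv_cmp_le hnd' hs_mem' hsP
  have hbu : (PySem.Dict.mk a).getD pu.1 [] = pu.2 := getD_mk_of_mem hnd hpu []
  have hbs : (PySem.Dict.mk a).getD ps.1 [] = ps.2 := getD_mk_of_mem hnd hps []
  have hbpos : (ps.1 ∈ pu.2.map (·.1) ∧ pu.1 ∈ ps.2.map (·.1) ∧ (PySem.Dict.mk ps.2).getD pu.1 0 ≠ -1) →
      ((PySem.Dict.mk pu.2).contains ps.1 && (PySem.Dict.mk ps.2).contains pu.1 &&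
        !((PySem.Dict.mk ps.2).getD pu.1 0 == -1)) = true := by
    intro hQ
    rw [contains_mk_eq, contains_mk_eq]
    simp [hQ.1, hQ.2.1, hQ.2.2]
  have hbneg : ¬ (ps.1 ∈ pu.2.map (·.1) ∧ pu.1 ∈ ps.2.map (·.1) ∧ (PySem.Dict.mk ps.2).getD pu.1 0 ≠ -1) →
      ¬ (((PySem.Dict.mk pu.2).contains ps.1 && (PySem.Dict.mk ps.2).contains pu.1 &&
        !((PySem.Dict.mk ps.2).getD pu.1 0 == -1)) = true) := by
    intro hQ hb
    apply hQ
    rw [contains_mk_eq, contains_mk_eq] at hb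
    simp only [Bool.and_eq_true, decide_eq_true_eq, Bool.not_eq_true', beq_eq_false_iff_ne, ne_eq] at hb
    exact ⟨hb.1.1, hb.1.2, hb.2⟩
  constructor
  · simp only [pvF, pvChar]
    rw [if_pos hcs, if_pos hle]
    simp only [hbu, hbs]
    by_cases hQ : (ps.1 ∈ pu.2.map (·.1) ∧ pu.1 ∈ ps.2.map (·.1) ∧ (PySem.Dict.mk ps.2).getD pu.1 0 ≠ -1)
    · rw [if_pos (hbpos hQ), if_pos hQ]
      by_cases hxy : (PySem.Dict.mk pu.2).getD ps.1 0 ≤ (PySem.Dict.mk ps.2).getD pu.1 0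
      · rw [if_pos hxy, if_pos hxy]; simp
      · rw [if_neg hxy, if_neg hxy]; simp
    · rw [if_neg (hbneg hQ), if_neg hQ]
  · intro hne
    have hnle : ¬ ((PySem.List.index? (pvKeys a) ps.1).getD 0 ≤ (PySem.List.index? (pvKeys a) pu.1).getD 0) := by
      rw [hkeys]
      exact pv_cmp_not_le hnd' hs_mem' hsP hne
    have hpair : ¬ ((ps.1, pu.1) = (pu.1, ps.1)) := fun h => hne (Prod.ext_iff.mp h).1
    simp only [pvF, pvChar]
    rw [if_pos hcu, if_neg hnle]
    simp only [hbu, hbs]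
    by_cases hQ : (ps.1 ∈ pu.2.map (·.1) ∧ pu.1 ∈ ps.2.map (·.1) ∧ (PySem.Dict.mk ps.2).getD pu.1 0 ≠ -1)
    · rw [if_pos (hbpos hQ), if_pos hQ]
      by_cases hxy : (PySem.Dict.mk pu.2).getD ps.1 0 ≤ (PySem.Dict.mk ps.2).getD pu.1 0
      · rw [if_pos hxy, if_pos hxy]; simp [hne]
      · rw [if_neg hxy, if_neg hxy]; simp [hne]
    · rw [if_neg (hbneg hQ), if_neg hQ]

-- s not a top-level key: the characterization keeps the value
lemma pvF_not_key (a : List (String × List (String × Int))) {s : String} (u : String)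
    (hs : s ∉ pvKeys a) (v : Int) : pvF a u s v = v := by
  have hc : ¬ (((pvKeys a).contains s) = true) := by simpa using hs
  simp only [pvF, pvChar]
  rw [if_neg hc]

-- one pass of A's inner loop body, seen on the shaped dictionary
lemma inner_step {a : List (String × List (String × Int))}
    (hnd : (pvKeys a).Nodup) (hin : ∀ p ∈ a, (p.2.map (·.1)).Nodup)
    {P R : List String} {pu : String × List (String × Int)} (hpu : pu ∈ a)
    (hkeys : pvKeys a = P ++ pu.1 :: R)
    {S₁ S₂ : List String} {s : String} (hbill : pu.2.map (·.1) = S₁ ++ s :: S₂) :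
    pvStepIn pu.1 P (pvD a (pvCIn P pu.1 S₁)) s = pvD a (pvCIn P pu.1 (S₁ ++ [s])) := by
  have hnd' : (P ++ pu.1 :: R).Nodup := by rw [← hkeys]; exact hnd
  have huP : pu.1 ∉ P := pv_not_mem_left hnd'
  have hbill_nd : (pu.2.map (·.1)).Nodup := hin pu hpu
  have hsS₁ : s ∉ S₁ := by
    have h1 : (S₁ ++ s :: S₂).Nodup := by rw [← hbill]; exact hbill_nd
    rw [List.nodup_append] at h1
    intro hmem
    exact h1.2.2 s hmem s (by simp) rfl
  have hs_in_bill : s ∈ pu.2.map (·.1) := by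
    rw [hbill]
    exact List.mem_append_right _ (by simp)
  set c := pvCIn P pu.1 S₁ with hc_def
  set c' := pvCIn P pu.1 (S₁ ++ [s]) with hc'_def
  have hc_eq_outside : ∀ x y : String, ¬ (x = pu.1 ∧ y = s) → ¬ (y = pu.1 ∧ x = s) →
      c x y = c' x y := by
    intro x y h1 h2
    apply bool_eq_of_iff
    rw [hc_def, hc'_def, pvCIn_iff, pvCIn_iff]
    simp only [List.mem_append, List.mem_singleton]
    constructor
    · intro h; tauto
    · intro h; tauto
  by_cases hPs : s ∈ P
  · -- sub_user already in finished_user: the body is skipped and nothing changes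
    have hcond : (!(P.contains s) && ((pvD a c).get? s).isSome) = false := by
      have hPc : (P.contains s) = true := by simpa using hPs
      rw [hPc]
      rfl
    simp only [pvStepIn]
    rw [if_neg (not_true_of_false hcond)]
    apply pvD_congr_entries
    intro p hp q hq
    apply pvVal_eq_of
    left
    apply bool_eq_of_iff
    rw [hc_def, hc'_def, pvCIn_iff, pvCIn_iff]
    simp only [List.mem_append, List.mem_singleton]
    constructor
    · intro h; tauto
    · intro h
      rcases h with h | h | ⟨h1, h2 | h2⟩ | ⟨h1, h2 | h2⟩
      · tauto
      · tauto
      · tauto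
      · subst h2; tauto
      · tauto
      · subst h2; tauto
  · have hPcont : (P.contains s) = false := by
      apply bool_false_of_not
      simpa using hPs
    by_cases hsK : s ∈ pvKeys a
    case neg =>
      -- sub_user not a top-level key: dict.get(sub_user) is None, body skipped
      have hcond : (!(P.contains s) && ((pvD a c).get? s).isSome) = false := by
        rw [pvD_get?_of_not_mem a c hsK]
        simp
      simp only [pvStepIn]
      rw [if_neg (not_true_of_false hcond)]
      apply pvD_congr_entries
      intro p hp q hq
      apply pvVal_eq_of
      by_cases hpq : p.1 = pu.1 ∧ q.1 = s
      · right
        rw [hpq.2]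
        exact pvF_not_key a p.1 hsK q.2
      · left
        refine hc_eq_outside p.1 q.1 hpq ?_
        rintro ⟨-, h2⟩
        exact hsK (h2 ▸ List.mem_map.mpr ⟨p, hp, rfl⟩)
    case pos =>
      obtain ⟨ps, hps, hps1⟩ := List.mem_map.mp hsK
      subst hps1
      obtain ⟨q_us, hq_us, hq_us1⟩ := List.mem_map.mp hs_in_bill
      have hps_nd : (ps.2.map (·.1)).Nodup := hin ps hps
      have hcond : (!(P.contains ps.1) && ((pvD a c).get? ps.1).isSome) = true := by
        rw [pvD_get?_of_mem c hnd hps, hPcont]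
        rfl
      have hcus : c pu.1 ps.1 = false := by
        apply bool_false_of_not
        rw [hc_def, pvCIn_iff]
        rintro (h | h | ⟨-, h⟩ | ⟨h1, h2⟩)
        · exact huP h
        · exact hPs h
        · exact hsS₁ h
        · exact hsS₁ (h1 ▸ h2)
      have hcsu : c ps.1 pu.1 = false := by
        apply bool_false_of_not
        rw [hc_def, pvCIn_iff]
        rintro (h | h | ⟨h1, h2⟩ | ⟨-, h⟩)
        · exact hPs h
        · exact huP h
        · exact hsS₁ (h1 ▸ h2)
        · exact hsS₁ h
      have hc'us : c' pu.1 ps.1 = true := by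
        rw [hc'_def]
        refine (pvCIn_iff _ _ _ _ _).mpr ?_
        exact Or.inr (Or.inr (Or.inl ⟨rfl, List.mem_append_right _ (by simp)⟩))
      have hc'su : c' ps.1 pu.1 = true := by
        rw [hc'_def]
        refine (pvCIn_iff _ _ _ _ _).mpr ?_
        exact Or.inr (Or.inr (Or.inr ⟨rfl, List.mem_append_right _ (by simp)⟩))
      have hread_u : (pvD a c).getD pu.1 PySem.Dict.empty = pvRowG a c pu.1 pu.2 :=
        pvD_getD_of_mem c hnd hpu
      have hread_s : (pvD a c).getD ps.1 PySem.Dict.empty = pvRowG a c ps.1 ps.2 :=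
        pvD_getD_of_mem c hnd hps
      have hgdu : (PySem.Dict.mk pu.2).getD ps.1 0 = q_us.2 := by
        rw [← hq_us1]
        exact getD_mk_of_mem hbill_nd hq_us 0
      have huser_need : (pvRowG a c pu.1 pu.2).getD ps.1 0 = q_us.2 := by
        rw [← hq_us1, pvRowG_getD_of_mem a c pu.1 hbill_nd hq_us]
        unfold pvVal
        rw [hq_us1, if_neg (not_true_of_false hcus)]
      have hmemb : ((pu.2.map (·.1)).contains ps.1) = true := by simpa using hs_in_bill
      have hag_u : ∀ q' ∈ pu.2, q'.1 ≠ ps.1 →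
          pvVal a c' pu.1 q'.1 q'.2 = pvVal a c pu.1 q'.1 q'.2 := by
        intro q' hq' hne
        refine (pvVal_eq_of (Or.inl (hc_eq_outside pu.1 q'.1 ?_ ?_))).symm
        · rintro ⟨-, h⟩; exact hne h
        · rintro ⟨h1, h2⟩; exact hne (h1.trans h2)
      have hag_s : ∀ q' ∈ ps.2, q'.1 ≠ pu.1 →
          pvVal a c' ps.1 q'.1 q'.2 = pvVal a c ps.1 q'.1 q'.2 := by
        intro q' hq' hne
        refine (pvVal_eq_of (Or.inl (hc_eq_outside ps.1 q'.1 ?_ ?_))).symm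
        · rintro ⟨h1, h2⟩; exact hne (h2.trans h1)
        · rintro ⟨h1, -⟩; exact hne h1
      have hrow_other : ∀ p ∈ a, p.1 ≠ pu.1 → p.1 ≠ ps.1 →
          pvRowG a c p.1 p.2 = pvRowG a c' p.1 p.2 := by
        intro p hp h1 h2
        apply pvShape_congr
        intro q hq
        apply pvVal_eq_of
        left
        refine hc_eq_outside p.1 q.1 ?_ ?_
        · rintro ⟨h, -⟩; exact h1 h
        · rintro ⟨-, h⟩; exact h2 h
      by_cases hups : pu.1 ∈ ps.2.map (·.1)
      case neg =>
        -- sub_user's bill has no entry for user: sub_user_need_to_pay = -1, body skipped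
        have hsub_need : ((pvRowG a c ps.1 ps.2).get? pu.1).getD (-1) = (-1 : Int) := by
          rw [pvRowG_get?_of_not_mem a c ps.1 hups]
          rfl
        simp only [pvStepIn]
        rw [if_pos hcond, hread_s, hsub_need]
        rw [if_neg (not_not_intro rfl)]
        apply pvD_congr_entries
        intro p hp q hq
        apply pvVal_eq_of
        by_cases hpq : p.1 = pu.1 ∧ q.1 = ps.1
        · right
          rw [hpq.1, hpq.2]
          rw [(pvF_shape hnd hpu hps hkeys hPs q.2).1]
          rw [if_neg (by rintro ⟨-, h, -⟩; exact hups h)]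
        · by_cases hpq2 : q.1 = pu.1 ∧ p.1 = ps.1
          · right
            have hsu : ps.1 ≠ pu.1 := by
              intro h
              exact hpq ⟨hpq2.2.trans h, hpq2.1.trans h.symm⟩
            rw [hpq2.1, hpq2.2]
            rw [(pvF_shape hnd hpu hps hkeys hPs q.2).2 hsu]
            rw [if_neg (by rintro ⟨-, h, -⟩; exact hups h)]
          · left
            exact hc_eq_outside p.1 q.1 hpq hpq2
      case pos =>
        obtain ⟨q_su, hq_su, hq_su1⟩ := List.mem_map.mp hups
        have hgds : (PySem.Dict.mk ps.2).getD pu.1 0 = q_su.2 := by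
          rw [← hq_su1]
          exact getD_mk_of_mem hps_nd hq_su 0
        have hsub_need : ((pvRowG a c ps.1 ps.2).get? pu.1).getD (-1) = q_su.2 := by
          rw [← hq_su1, pvRowG_get?_of_mem a c ps.1 hps_nd hq_su, Option.getD_some]
          unfold pvVal
          rw [hq_su1, if_neg (not_true_of_false hcsu)]
        simp only [pvStepIn]
        rw [if_pos hcond, hread_u, hread_s, hsub_need, huser_need]
        by_cases hm1 : q_su.2 = -1
        · -- stored sentinel -1: body skipped
          rw [if_neg (not_not_intro hm1)]
          apply pvD_congr_entries
          intro p hp q hq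
          apply pvVal_eq_of
          by_cases hpq : p.1 = pu.1 ∧ q.1 = ps.1
          · right
            rw [hpq.1, hpq.2]
            rw [(pvF_shape hnd hpu hps hkeys hPs q.2).1]
            rw [if_neg (by rintro ⟨-, -, h⟩; exact h (hgds.trans hm1))]
          · by_cases hpq2 : q.1 = pu.1 ∧ p.1 = ps.1
            · right
              have hsu : ps.1 ≠ pu.1 := by
                intro h
                exact hpq ⟨hpq2.2.trans h, hpq2.1.trans h.symm⟩
              rw [hpq2.1, hpq2.2]
              rw [(pvF_shape hnd hpu hps hkeys hPs q.2).2 hsu]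
              rw [if_neg (by rintro ⟨-, -, h⟩; exact h (hgds.trans hm1))]
            · left
              exact hc_eq_outside p.1 q.1 hpq hpq2
        · -- the pair is netted
          rw [if_pos hm1, pvRowG_keys, if_pos hmemb]
          have hQ : (ps.1 ∈ pu.2.map (·.1) ∧ pu.1 ∈ ps.2.map (·.1) ∧
              (PySem.Dict.mk ps.2).getD pu.1 0 ≠ -1) :=
            ⟨hs_in_bill, hups, by rw [hgds]; exact hm1⟩
          have hF1 : ∀ v : Int, pvF a pu.1 ps.1 v =
              if q_us.2 ≤ q_su.2 then 0 else q_us.2 - q_su.2 := by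
            intro v
            rw [(pvF_shape hnd hpu hps hkeys hPs v).1, if_pos hQ, hgdu, hgds]
          have hF2 : ps.1 ≠ pu.1 → ∀ v : Int, pvF a ps.1 pu.1 v =
              if q_us.2 ≤ q_su.2 then q_su.2 - q_us.2 else 0 := by
            intro hsu v
            rw [(pvF_shape hnd hpu hps hkeys hPs v).2 hsu, if_pos hQ, hgdu, hgds]
          by_cases hle : q_us.2 ≤ q_su.2
          · rw [if_pos hle]
            have h_ins1_row : (pvRowG a c pu.1 pu.2).insert ps.1 0 = pvRowG a c' pu.1 pu.2 := by
              have h := pvShape_insert pu.2 (fun y v => pvVal a c pu.1 y v)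
                (fun y v => pvVal a c' pu.1 y v) hbill_nd q_us hq_us 0
                (by
                  show (0 : Int) = pvVal a c' pu.1 q_us.1 q_us.2
                  unfold pvVal
                  rw [hq_us1, if_pos hc'us, hF1, if_pos hle])
                (fun q' hq' hne => hag_u q' hq' (by rw [← hq_us1]; exact hne))
              rw [hq_us1] at h
              unfold pvRowG
              exact h
            rw [h_ins1_row]
            by_cases hsu : ps.1 = pu.1
            · -- self pair: both writes hit the same entry, final value 0
              have hpspu : pu = ps := key_inj hnd hps hpu hsu.symm
              subst hpspu
              have hqq : q_us = q_su := key_inj hbill_nd hq_su hq_us (hq_us1.trans hq_su1.symm)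
              subst hqq
              have h_d1 : (pvD a c).insert pu.1 (pvRowG a c' pu.1 pu.2) =
                  pvShape a (fun x bill => if x = pu.1 then pvRowG a c' pu.1 bill
                    else pvRowG a c x bill) := by
                unfold pvD
                refine pvShape_insert a _ _ hnd pu hpu _ ?_ ?_
                · simp
                · intro p' hp' hne
                  simp [hne]
              rw [h_d1]
              have h_read1 : (pvShape a (fun x bill => if x = pu.1 then pvRowG a c' pu.1 bill
                  else pvRowG a c x bill)).getD pu.1 PySem.Dict.empty = pvRowG a c' pu.1 pu.2 := by
                simpa using pvShape_getD_of_mem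
                  (fun x bill => if x = pu.1 then pvRowG a c' pu.1 bill else pvRowG a c x bill)
                  hnd hpu PySem.Dict.empty
              rw [h_read1]
              have h_ins2_row : (pvRowG a c' pu.1 pu.2).insert pu.1 (q_us.2 - q_us.2) =
                  pvRowG a c' pu.1 pu.2 := by
                have h := pvShape_insert pu.2 (fun y v => pvVal a c' pu.1 y v)
                  (fun y v => pvVal a c' pu.1 y v) hbill_nd q_us hq_us (q_us.2 - q_us.2)
                  (by
                    show q_us.2 - q_us.2 = pvVal a c' pu.1 q_us.1 q_us.2
                    unfold pvVal
                    rw [hq_us1, if_pos hc'us, hF1, if_pos hle]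
                    omega)
                  (fun q' hq' hne => rfl)
                rw [hq_us1] at h
                unfold pvRowG
                exact h
              rw [h_ins2_row]
              have h_d2 : (pvShape a (fun x bill => if x = pu.1 then pvRowG a c' pu.1 bill
                  else pvRowG a c x bill)).insert pu.1 (pvRowG a c' pu.1 pu.2) =
                  pvShape a (fun x bill => if x = pu.1 then pvRowG a c' pu.1 bill
                    else pvRowG a c x bill) := by
                refine pvShape_insert a _ _ hnd pu hpu _ ?_ ?_
                · simp
                · intro p' hp' hne
                  rfl
              rw [h_d2]
              unfold pvD
              apply pvShape_congr
              intro p hp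
              by_cases h1 : p.1 = pu.1
              · rw [if_pos h1, h1]
              · rw [if_neg h1]
                exact hrow_other p hp h1 h1
            · -- distinct pair, user's debt smaller or equal
              have h_d1 : (pvD a c).insert pu.1 (pvRowG a c' pu.1 pu.2) =
                  pvShape a (fun x bill => if x = pu.1 then pvRowG a c' pu.1 bill
                    else pvRowG a c x bill) := by
                unfold pvD
                refine pvShape_insert a _ _ hnd pu hpu _ ?_ ?_
                · simp
                · intro p' hp' hne
                  simp [hne]
              rw [h_d1]
              have h_read1 : (pvShape a (fun x bill => if x = pu.1 then pvRowG a c' pu.1 bill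
                  else pvRowG a c x bill)).getD ps.1 PySem.Dict.empty = pvRowG a c ps.1 ps.2 := by
                have h := pvShape_getD_of_mem
                  (fun x bill => if x = pu.1 then pvRowG a c' pu.1 bill else pvRowG a c x bill)
                  hnd hps PySem.Dict.empty
                simpa [hsu] using h
              rw [h_read1]
              have h_ins2_row : (pvRowG a c ps.1 ps.2).insert pu.1 (q_su.2 - q_us.2) =
                  pvRowG a c' ps.1 ps.2 := by
                have h := pvShape_insert ps.2 (fun y v => pvVal a c ps.1 y v)
                  (fun y v => pvVal a c' ps.1 y v) hps_nd q_su hq_su (q_su.2 - q_us.2)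
                  (by
                    show q_su.2 - q_us.2 = pvVal a c' ps.1 q_su.1 q_su.2
                    unfold pvVal
                    rw [hq_su1, if_pos hc'su, hF2 hsu, if_pos hle])
                  (fun q' hq' hne => hag_s q' hq' (by rw [← hq_su1]; exact hne))
                rw [hq_su1] at h
                unfold pvRowG
                exact h
              rw [h_ins2_row]
              have h_d2 : (pvShape a (fun x bill => if x = pu.1 then pvRowG a c' pu.1 bill
                  else pvRowG a c x bill)).insert ps.1 (pvRowG a c' ps.1 ps.2) =
                  pvShape a (fun x bill => if x = ps.1 then pvRowG a c' ps.1 bill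
                    else if x = pu.1 then pvRowG a c' pu.1 bill else pvRowG a c x bill) := by
                refine pvShape_insert a _ _ hnd ps hps _ ?_ ?_
                · simp
                · intro p' hp' hne
                  simp [hne]
              rw [h_d2]
              unfold pvD
              apply pvShape_congr
              intro p hp
              by_cases h1 : p.1 = ps.1
              · rw [if_pos h1, h1]
              · rw [if_neg h1]
                by_cases h2 : p.1 = pu.1
                · rw [if_pos h2, h2]
                · rw [if_neg h2]
                  exact hrow_other p hp h2 h1
          · -- user's debt strictly larger
            rw [if_neg hle]
            have hsu : ps.1 ≠ pu.1 := by
              intro h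
              have hpspu : ps = pu := key_inj hnd hpu hps h
              apply hle
              have hqq : q_su = q_us := by
                refine key_inj hbill_nd hq_us ?_ ?_
                · rw [← hpspu]
                  exact hq_su
                · rw [hq_su1, hq_us1, h]
              rw [hqq]
            have h_ins1_row : (pvRowG a c ps.1 ps.2).insert pu.1 0 = pvRowG a c' ps.1 ps.2 := by
              have h := pvShape_insert ps.2 (fun y v => pvVal a c ps.1 y v)
                (fun y v => pvVal a c' ps.1 y v) hps_nd q_su hq_su 0
                (by
                  show (0 : Int) = pvVal a c' ps.1 q_su.1 q_su.2
                  unfold pvVal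
                  rw [hq_su1, if_pos hc'su, hF2 hsu, if_neg hle])
                (fun q' hq' hne => hag_s q' hq' (by rw [← hq_su1]; exact hne))
              rw [hq_su1] at h
              unfold pvRowG
              exact h
            rw [h_ins1_row]
            have h_d1 : (pvD a c).insert ps.1 (pvRowG a c' ps.1 ps.2) =
                pvShape a (fun x bill => if x = ps.1 then pvRowG a c' ps.1 bill
                  else pvRowG a c x bill) := by
              unfold pvD
              refine pvShape_insert a _ _ hnd ps hps _ ?_ ?_
              · simp
              · intro p' hp' hne
                simp [hne]
            rw [h_d1]
            have h_read1 : (pvShape a (fun x bill => if x = ps.1 then pvRowG a c' ps.1 bill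
                else pvRowG a c x bill)).getD pu.1 PySem.Dict.empty = pvRowG a c pu.1 pu.2 := by
              have h := pvShape_getD_of_mem
                (fun x bill => if x = ps.1 then pvRowG a c' ps.1 bill else pvRowG a c x bill)
                hnd hpu PySem.Dict.empty
              have hne' : ¬ (pu.1 = ps.1) := fun h' => hsu h'.symm
              simpa [hne'] using h
            rw [h_read1]
            have h_ins2_row : (pvRowG a c pu.1 pu.2).insert ps.1 (q_us.2 - q_su.2) =
                pvRowG a c' pu.1 pu.2 := by
              have h := pvShape_insert pu.2 (fun y v => pvVal a c pu.1 y v)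
                (fun y v => pvVal a c' pu.1 y v) hbill_nd q_us hq_us (q_us.2 - q_su.2)
                (by
                  show q_us.2 - q_su.2 = pvVal a c' pu.1 q_us.1 q_us.2
                  unfold pvVal
                  rw [hq_us1, if_pos hc'us, hF1, if_neg hle])
                (fun q' hq' hne => hag_u q' hq' (by rw [← hq_us1]; exact hne))
              rw [hq_us1] at h
              unfold pvRowG
              exact h
            rw [h_ins2_row]
            have h_d2 : (pvShape a (fun x bill => if x = ps.1 then pvRowG a c' ps.1 bill
                else pvRowG a c x bill)).insert pu.1 (pvRowG a c' pu.1 pu.2) =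
                pvShape a (fun x bill => if x = pu.1 then pvRowG a c' pu.1 bill
                  else if x = ps.1 then pvRowG a c' ps.1 bill else pvRowG a c x bill) := by
              refine pvShape_insert a _ _ hnd pu hpu _ ?_ ?_
              · simp
              · intro p' hp' hne
                simp [hne]
            rw [h_d2]
            unfold pvD
            apply pvShape_congr
            intro p hp
            by_cases h1 : p.1 = pu.1
            · rw [if_pos h1, h1]
            · rw [if_neg h1]
              by_cases h2 : p.1 = ps.1
              · rw [if_pos h2, h2]
              · rw [if_neg h2]
                exact hrow_other p hp h1 h2

-- A's inner loop, folded
lemma inner_fold {a : List (String × List (String × Int))}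
    (hnd : (pvKeys a).Nodup) (hin : ∀ p ∈ a, (p.2.map (·.1)).Nodup)
    {P R : List String} {pu : String × List (String × Int)} (hpu : pu ∈ a)
    (hkeys : pvKeys a = P ++ pu.1 :: R) :
    ∀ (S₂ S₁ : List String), pu.2.map (·.1) = S₁ ++ S₂ →
      S₂.foldl (pvStepIn pu.1 P) (pvD a (pvCIn P pu.1 S₁)) = pvD a (pvCIn P pu.1 (S₁ ++ S₂)) := by
  intro S₂
  induction S₂ with
  | nil =>
    intro S₁ h
    rw [List.foldl_nil, List.append_nil]
  | cons s S₂' ih =>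
    intro S₁ h
    rw [List.foldl_cons, inner_step hnd hin hpu hkeys h,
      ih (S₁ ++ [s]) (by rw [h, List.append_assoc, List.singleton_append]),
      List.append_assoc, List.singleton_append]

-- one pass of A's outer loop body
lemma outer_step {a : List (String × List (String × Int))}
    (hnd : (pvKeys a).Nodup) (hin : ∀ p ∈ a, (p.2.map (·.1)).Nodup)
    {P R : List String} {pu : String × List (String × Int)} (hpu : pu ∈ a)
    (hkeys : pvKeys a = P ++ pu.1 :: R) :
    pvStepOut (pvD a (pvCOut P), P) pu.1 = (pvD a (pvCOut (P ++ [pu.1])), P ++ [pu.1]) := by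
  simp only [pvStepOut]
  rw [pvD_getD_of_mem (pvCOut P) hnd hpu, pvRowG_keys]
  have hinit : pvD a (pvCOut P) = pvD a (pvCIn P pu.1 []) := by
    apply pvD_congr_entries
    intro p hp q hq
    apply pvVal_eq_of
    left
    apply bool_eq_of_iff
    rw [pvCOut_iff, pvCIn_iff]
    simp
  rw [hinit]
  rw [inner_fold hnd hin hpu hkeys (pu.2.map (·.1)) [] (by rw [List.nil_append]),
    List.nil_append]
  have hfin : pvD a (pvCIn P pu.1 (pu.2.map (·.1))) = pvD a (pvCOut (P ++ [pu.1])) := by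
    apply pvD_congr_entries
    intro p hp q hq
    apply pvVal_eq_of
    by_cases hxP : p.1 ∈ P
    · left
      apply bool_eq_of_iff
      rw [pvCIn_iff, pvCOut_iff]
      simp [List.mem_append, hxP]
    · by_cases hyP : q.1 ∈ P
      · left
        apply bool_eq_of_iff
        rw [pvCIn_iff, pvCOut_iff]
        simp [List.mem_append, hyP]
      · by_cases hx : p.1 = pu.1
        · have hp_eq : p = pu := key_inj hnd hpu hp hx
          have hq' : q.1 ∈ pu.2.map (·.1) := List.mem_map.mpr ⟨q, hp_eq ▸ hq, rfl⟩
          left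
          apply bool_eq_of_iff
          rw [pvCIn_iff, pvCOut_iff]
          simp [List.mem_append, hx, hq']
        · by_cases hy : q.1 = pu.1
          · by_cases hyb : p.1 ∈ pu.2.map (·.1)
            · left
              apply bool_eq_of_iff
              rw [pvCIn_iff, pvCOut_iff]
              simp [List.mem_append, hy, hyb]
            · right
              rw [hy]
              rw [(pvF_shape hnd hpu hp hkeys hxP q.2).2 hx]
              rw [if_neg (by rintro ⟨h, -, -⟩; exact hyb h)]
          · left
            apply bool_eq_of_iff
            rw [pvCIn_iff, pvCOut_iff]
            simp [List.mem_append, hxP, hyP, hx, hy]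
  rw [hfin]

-- A's outer loop, folded
lemma outer_fold {a : List (String × List (String × Int))}
    (hnd : (pvKeys a).Nodup) (hin : ∀ p ∈ a, (p.2.map (·.1)).Nodup) :
    ∀ (R P : List String), pvKeys a = P ++ R →
      R.foldl pvStepOut (pvD a (pvCOut P), P) = (pvD a (pvCOut (P ++ R)), P ++ R) := by
  intro R
  induction R with
  | nil =>
    intro P h
    rw [List.foldl_nil, List.append_nil]
  | cons u R' ih =>
    intro P h
    have hu : u ∈ pvKeys a := by
      rw [h]
      exact List.mem_append_right _ (by simp)
    obtain ⟨pu, hpu, hpu1⟩ := List.mem_map.mp hu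
    subst hpu1
    rw [List.foldl_cons, outer_step hnd hin hpu h,
      ih (P ++ [pu.1]) (by rw [h, List.append_assoc, List.singleton_append]),
      List.append_assoc, List.singleton_append]

-- A computes exactly the characterization formula at every entry (no D_ assumption)
lemma simple_process_char (a : List (String × List (String × Int)))
    (hnd : (pvKeys a).Nodup) (hin : ∀ p ∈ a, (p.2.map (·.1)).Nodup) :
    simple_process a =
      a.map (fun p => (p.1, p.2.map (fun q => (q.1, pvF a p.1 q.1 q.2)))) := by
  rw [simple_process_def]
  have h0 : PySem.Dict.mk (a.map (fun p => (p.1, PySem.Dict.mk p.2))) = pvD a (pvCOut []) := by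
    unfold pvD pvShape
    congr 1
    apply List.map_congr_left
    intro p hp
    have hmap : p.2.map (fun q => (q.1, pvVal a (pvCOut []) p.1 q.1 q.2)) =
        p.2.map (fun q => q) :=
      List.map_congr_left (fun q hq => by simp [pvVal, pvCOut])
    show (p.1, PySem.Dict.mk p.2) = (p.1, PySem.Dict.mk (p.2.map _))
    rw [hmap, List.map_id']
  rw [h0, pvD_keys]
  rw [outer_fold hnd hin (pvKeys a) [] (by rw [List.nil_append]), List.nil_append]
  unfold pvD pvShape
  rw [items_mk, List.map_map]
  apply List.map_congr_left
  intro p hp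
  simp only [Function.comp_apply]
  congr 1
  unfold pvRowG pvShape
  rw [items_mk]
  apply List.map_congr_left
  intro q hq
  have hc : pvCOut (pvKeys a) p.1 q.1 = true :=
    (pvCOut_iff _ _ _).mpr (Or.inl (List.mem_map.mpr ⟨p, hp, rfl⟩))
  show (q.1, pvVal a (pvCOut (pvKeys a)) p.1 q.1 q.2) = (q.1, pvF a p.1 q.1 q.2)
  unfold pvVal
  rw [if_pos hc]

-- evaluating Source B's formula at an entry of a listed row
lemma pvNetted_eval {a : List (String × List (String × Int))}
    (hnd : (pvKeys a).Nodup) {ps : String × List (String × Int)} (hps : ps ∈ a)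
    (u : String) (v : Int) :
    pvNetted a u ps.1 v =
      if u ∈ ps.2.map (·.1) then max (v - (PySem.Dict.mk ps.2).getD u 0) 0 else v := by
  have hc : (PySem.Dict.mk a).contains ps.1 = true := by
    rw [contains_mk_eq]
    exact decide_eq_true (List.mem_map.mpr ⟨ps, hps, rfl⟩)
  have hb : (PySem.Dict.mk a).getD ps.1 [] = ps.2 := getD_mk_of_mem hnd hps []
  simp only [pvNetted, hb, hc, contains_mk_eq, Bool.true_and]
  by_cases hm : u ∈ ps.2.map (·.1)
  · rw [if_pos (decide_eq_true hm), if_pos hm]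
  · rw [if_neg (by simpa using hm), if_neg hm]

-- s not a top-level key: Source B's formula keeps the value
lemma pvNetted_not_key (a : List (String × List (String × Int))) {s : String} (u : String)
    (hs : s ∉ pvKeys a) (v : Int) : pvNetted a u s v = v := by
  have hc : (PySem.Dict.mk a).contains s = false := by
    rw [contains_mk_eq]
    exact decide_eq_false hs
  simp only [pvNetted, hc, Bool.false_and]
  rfl

-- two members of a list, split at whichever comes first
lemma pv_split_two {x y : String} (l : List String) :
    x ∈ l → y ∈ l →
      (∃ P R, l = P ++ x :: R ∧ y ∉ P) ∨ (∃ P R, l = P ++ y :: R ∧ x ∉ P ∧ x ≠ y) := by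
  induction l with
  | nil => intro hx _; simp at hx
  | cons z t ih =>
    intro hx hy
    by_cases hxz : x = z
    · exact Or.inl ⟨[], t, by simp [hxz], by simp⟩
    · by_cases hyz : y = z
      · exact Or.inr ⟨[], t, by simp [hyz], by simp, fun h => hxz (h.trans hyz)⟩
      · have hx' : x ∈ t := by
          rcases List.mem_cons.mp hx with h | h
          · exact absurd h hxz
          · exact h
        have hy' : y ∈ t := by
          rcases List.mem_cons.mp hy with h | h
          · exact absurd h hyz
          · exact h
        rcases ih hx' hy' with ⟨P, R, hl, hnp⟩ | ⟨P, R, hl, hnp, hne⟩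
        · refine Or.inl ⟨z :: P, R, by rw [hl]; rfl, ?_⟩
          simp only [List.mem_cons, not_or]
          exact ⟨hyz, hnp⟩
        · refine Or.inr ⟨z :: P, R, by rw [hl]; rfl, ?_, hne⟩
          simp only [List.mem_cons, not_or]
          exact ⟨hxz, hnp⟩

-- a two-element sublist splits the list around its first element
lemma pv_pair_split {α : Type} {p q : α} :
    ∀ {a : List α}, [p, q].Sublist a → ∃ A₁ A₂, a = A₁ ++ p :: A₂ ∧ q ∈ A₂ := by
  intro a
  induction a with
  | nil => intro h; cases h
  | cons z t ih =>
    intro h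
    cases h with
    | cons =>
      rename_i h'
      obtain ⟨A₁, A₂, hsplit, hq⟩ := ih h'
      exact ⟨z :: A₁, A₂, by rw [hsplit]; rfl, hq⟩
    | cons₂ =>
      rename_i h'
      exact ⟨[], t, rfl, List.singleton_sublist.mp h'⟩

-- the configuration in which A's -1 sentinel fires is exactly a D_ witness
lemma pv_D_of {a : List (String × List (String × Int))}
    (hnd : (pvKeys a).Nodup)
    {P R : List String} {pu ps : String × List (String × Int)} (hpu : pu ∈ a) (hps : ps ∈ a)
    (hkeys : pvKeys a = P ++ pu.1 :: R) (hsP : ps.1 ∉ P)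
    (hs_in_bill : ps.1 ∈ pu.2.map (·.1))
    {q_su : String × Int} (hq_su : q_su ∈ ps.2) (hq_su1 : q_su.1 = pu.1)
    (hps_nd : (ps.2.map (·.1)).Nodup) (hm1 : q_su.2 = -1) :
    D_simple_process a := by
  have hget?su : (PySem.Dict.mk ps.2).get? pu.1 = some (-1) := by
    rw [← hq_su1, get?_mk_eq_find?, find?_key_nodup hps_nd hq_su]
    simp [hm1]
  have hisSome : ((PySem.Dict.mk pu.2).get? ps.1).isSome = true := by
    rw [get?_mk_eq_find?, Option.isSome_map]
    obtain ⟨q_us, hq_us, hq_us1⟩ := List.mem_map.mp hs_in_bill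
    rw [List.find?_isSome]
    exact ⟨q_us, hq_us, by simp [hq_us1]⟩
  refine ⟨pu, hpu, ps, hps, ?_, Option.ne_none_iff_isSome.mpr hisSome, hget?su⟩
  by_cases hsu : ps = pu
  · exact Or.inr hsu.symm
  · left
    -- split a at pu's position; ps lies strictly after it
    obtain ⟨A₁, A₂', hsplit, hmap1, hmap2⟩ := List.map_eq_append_iff.mp hkeys
    obtain ⟨x, A₂, hx2, hx1, hmapR⟩ := List.map_eq_cons_iff.mp hmap2
    subst hx2
    have hxa : x ∈ a := by
      rw [hsplit]
      exact List.mem_append_right _ (by simp)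
    have hxpu : x = pu := key_inj hnd hpu hxa hx1
    have hpsA₂ : ps ∈ A₂ := by
      have hmem := hps
      rw [hsplit] at hmem
      rcases List.mem_append.mp hmem with h | h
      · exact absurd (hmap1 ▸ List.mem_map.mpr ⟨ps, h, rfl⟩) hsP
      · rcases List.mem_cons.mp h with h' | h'
        · exact absurd (h'.trans hxpu) hsu
        · exact h'
    have h1 : [pu, ps].Sublist (pu :: A₂) :=
      List.Sublist.cons₂ _ (List.singleton_sublist.mpr hpsA₂)
    have h2 : (pu :: A₂).Sublist (A₁ ++ pu :: A₂) := List.sublist_append_right _ _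
    rw [hsplit, hxpu]
    exact h1.trans h2

-- outside D_, A's characterization agrees with B's closed formula at every listed entry
lemma pvF_eq_netted {a : List (String × List (String × Int))}
    (hnd : (pvKeys a).Nodup) (hin : ∀ p ∈ a, (p.2.map (·.1)).Nodup)
    (hD : ¬ D_simple_process a) {pu : String × List (String × Int)} (hpu : pu ∈ a)
    {q : String × Int} (hq : q ∈ pu.2) :
    pvF a pu.1 q.1 q.2 = pvNetted a pu.1 q.1 q.2 := by
  by_cases hsK : q.1 ∈ pvKeys a
  case neg =>
    rw [pvF_not_key a pu.1 hsK q.2, pvNetted_not_key a pu.1 hsK q.2]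
  case pos =>
    obtain ⟨ps, hps, hps1⟩ := List.mem_map.mp hsK
    rw [← hps1]
    have hbill_nd : (pu.2.map (·.1)).Nodup := hin pu hpu
    have hps_nd : (ps.2.map (·.1)).Nodup := hin ps hps
    have hs_in_bill : ps.1 ∈ pu.2.map (·.1) := List.mem_map.mpr ⟨q, hq, hps1.symm⟩
    have hgdu : (PySem.Dict.mk pu.2).getD ps.1 0 = q.2 := by
      rw [hps1]
      exact getD_mk_of_mem hbill_nd hq 0
    have hupu : pu.1 ∈ pvKeys a := List.mem_map.mpr ⟨pu, hpu, rfl⟩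
    have hs_mem : ps.1 ∈ pvKeys a := by rw [hps1]; exact hsK
    rcases pv_split_two (pvKeys a) hupu hs_mem with ⟨P, R, hkeys, hsP⟩ | ⟨P, R, hkeys, hpP, hne⟩
    · -- pu comes first in the key order
      rw [(pvF_shape hnd hpu hps hkeys hsP q.2).1, pvNetted_eval hnd hps pu.1 q.2]
      by_cases hm : pu.1 ∈ ps.2.map (·.1)
      · by_cases hsent : (PySem.Dict.mk ps.2).getD pu.1 0 = -1
        · exfalso
          obtain ⟨q_su, hq_su, hq_su1⟩ := List.mem_map.mp hm
          have hgds : (PySem.Dict.mk ps.2).getD q_su.1 0 = q_su.2 :=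
            getD_mk_of_mem hps_nd hq_su 0
          rw [hq_su1] at hgds
          have hm1 : q_su.2 = -1 := by omega
          exact hD (pv_D_of hnd hpu hps hkeys hsP hs_in_bill hq_su hq_su1 hps_nd hm1)
        · rw [if_pos ⟨hs_in_bill, hm, hsent⟩, if_pos hm, hgdu]
          omega
      · rw [if_neg (by rintro ⟨-, h, -⟩; exact hm h), if_neg hm]
    · -- ps comes first in the key order
      rw [(pvF_shape hnd hps hpu hkeys hpP q.2).2 hne, pvNetted_eval hnd hps pu.1 q.2]
      by_cases hm : pu.1 ∈ ps.2.map (·.1)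
      · by_cases hsent : q.2 = -1
        · exfalso
          exact hD (pv_D_of hnd hps hpu hkeys hpP hm hq hps1.symm hbill_nd hsent)
        · have hQ : (pu.1 ∈ ps.2.map (·.1) ∧ ps.1 ∈ pu.2.map (·.1) ∧
              (PySem.Dict.mk pu.2).getD ps.1 0 ≠ -1) :=
            ⟨hm, hs_in_bill, by rw [hgdu]; exact hsent⟩
          rw [if_pos hQ, if_pos hm, hgdu]
          omega
      · rw [if_neg (by rintro ⟨h, -, -⟩; exact hm h), if_neg hm]

-- ===== VERDICT (by name: the statements are the Claim_ definitions above) =====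
theorem simple_process_spec : Claim_unchanged_simple_process := by
  unfold Claim_unchanged_simple_process
  intro a _hdom hpre
  unfold Spec_simple_process
  intro hD
  rw [simple_process_char a hpre.1 hpre.2]
  simp only [simple_process_alt]
  apply List.map_congr_left
  intro p hp
  congr 1
  apply List.map_congr_left
  intro q hq
  congr 1
  exact pvF_eq_netted hpre.1 hpre.2 hD hp hq

theorem simple_process_changed : Claim_changed_simple_process := by
  unfold Claim_changed_simple_process
  decide

theorem simple_process_tight : Claim_exact_simple_process := by
  unfold Claim_exact_simple_process
  intro a _hdom hpre hD heq
  have hnd : (pvKeys a).Nodup := hpre.1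
  have hin : ∀ p ∈ a, (p.2.map (·.1)).Nodup := hpre.2
  obtain ⟨p, hp, qq, hqa, hord, hpq_some, hqp_neg⟩ := hD
  -- the entry holding the -1, and the mutual entry
  rw [get?_mk_eq_find?] at hqp_neg
  obtain ⟨e, hfind, he2⟩ := Option.map_eq_some_iff.mp hqp_neg
  have he_mem : e ∈ qq.2 := List.mem_of_find?_eq_some hfind
  have he1 : e.1 = p.1 := by simpa using List.find?_some hfind
  have hgd : (PySem.Dict.mk qq.2).getD p.1 0 = -1 := by
    rw [PySem.Dict.getD_eq_get?_getD, get?_mk_eq_find?, hfind, Option.map_some, he2]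
    rfl
  have hmut : qq.1 ∈ p.2.map (·.1) := by
    rw [get?_mk_eq_find?] at hpq_some
    rcases hfs : p.2.find? (fun r => r.1 == qq.1) with _ | e'
    · rw [hfs] at hpq_some
      simp at hpq_some
    · have he' : e' ∈ p.2 := List.mem_of_find?_eq_some hfs
      have he'1 : e'.1 = qq.1 := by simpa using List.find?_some hfs
      exact List.mem_map.mpr ⟨e', he', he'1⟩
  -- A leaves the -1 entry untouched: the sentinel fires on this pair
  have hAval : ∀ v : Int, pvF a qq.1 p.1 v = v := by
    rcases hord with hsub | rfl
    · obtain ⟨A₁, A₂, hsplit, hqA₂⟩ := pv_pair_split hsub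
      have hkeys : pvKeys a = (A₁.map (·.1)) ++ p.1 :: (A₂.map (·.1)) := by
        rw [hsplit]
        simp [pvKeys]
      have hnd' : ((A₁.map (·.1)) ++ p.1 :: (A₂.map (·.1))).Nodup := by
        rw [← hkeys]
        exact hnd
      have hq1A₂ : qq.1 ∈ A₂.map (·.1) := List.mem_map.mpr ⟨qq, hqA₂, rfl⟩
      have hsP : qq.1 ∉ A₁.map (·.1) := by
        rw [List.nodup_append] at hnd'
        intro hmem
        exact hnd'.2.2 qq.1 hmem qq.1 (List.mem_cons_of_mem _ hq1A₂) rfl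
      have hne : qq.1 ≠ p.1 := by
        rw [List.nodup_append, List.nodup_cons] at hnd'
        intro h
        exact hnd'.2.1.1 (h ▸ hq1A₂)
      intro v
      rw [(pvF_shape hnd hp hqa hkeys hsP v).2 hne]
      rw [if_neg (by rintro ⟨-, -, h⟩; exact h hgd)]
    · obtain ⟨A₁, A₂, hsplit⟩ := List.append_of_mem hp
      have hkeys : pvKeys a = (A₁.map (·.1)) ++ p.1 :: (A₂.map (·.1)) := by
        rw [hsplit]
        simp [pvKeys]
      have hnd' : ((A₁.map (·.1)) ++ p.1 :: (A₂.map (·.1))).Nodup := by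
        rw [← hkeys]
        exact hnd
      have hsP : p.1 ∉ A₁.map (·.1) := pv_not_mem_left hnd'
      intro v
      rw [(pvF_shape hnd hp hp hkeys hsP v).1]
      rw [if_neg (by rintro ⟨-, -, h⟩; exact h hgd)]
  -- but B nets it to a nonnegative value
  rw [simple_process_char a hnd hin] at heq
  simp only [simple_process_alt] at heq
  have hrow := List.map_inj_left.mp heq qq hqa
  have hsnd := congrArg Prod.snd hrow
  have hent := List.map_inj_left.mp hsnd e he_mem
  have hv := congrArg Prod.snd hent
  simp only at hv
  rw [he1, hAval e.2, pvNetted_eval hnd hp qq.1 e.2, if_pos hmut] at hv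
  have h0 : (0 : Int) ≤ max (e.2 - (PySem.Dict.mk p.2).getD qq.1 0) 0 := le_max_right _ _
  omega
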